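-- pv_equiv track=rewrite | github.com/mrvgao/music_embedding | utilities.py | search_nearest
-- ===== SOURCE A (Python) =====
-- def search_nearest(value, L):
--     if value <= L[0]: return L[0]
--     if value >= L[-1]: return L[-1]
--
--     list_length = len(L)
--
--     if list_length % 2 == 0:
--         half_right = list_length // 2
--         half_left = half_right - 1
--     else:
--         half_right = (list_length + 1) // 2
--         half_left = half_right - 1
--
--     assert 0 <= half_left <= half_right < list_length
--
--     if value > L[half_right]:
--         return search_nearest(value, L[half_right:])
--     elif value < L[half_left]:
--         return search_nearest(value, L[: half_left + 1])
--     else: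
--         left_delta = abs(value - L[half_left])
--         right_delta = abs(value - L[half_right])
--
--         return L[half_left] if left_delta <= right_delta else L[half_right]
-- ===== SOURCE B (Python) =====
-- def search_nearest(value, L):
--     # iterative two-pointer binary search over index bounds; no sublist construction
--     lo, hi = 0, len(L) - 1
--     while True:
--         if value <= L[lo]:
--             return L[lo]
--         if value >= L[hi]:
--             return L[hi]
--         n = hi - lo + 1
--         mid_right = lo + (n + 1) // 2
--         mid_left = mid_right - 1
--         if value > L[mid_right]:
--             lo = mid_right
--         elif value < L[mid_left]:
--             hi = mid_left
--         else:
--             left_delta = value - L[mid_left]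
--             right_delta = L[mid_right] - value
--             return L[mid_left] if left_delta <= right_delta else L[mid_right]
-- ===== Notes on version B (the rewrite author's own statement) =====
-- stated objective: alternative
-- what changed: A's recursive binary chop that builds a new list slice at every level is replaced by an iterative two-pointer binary search over index bounds (lo, hi), performing the same comparisons without copying; it trades recursion and slicing for index arithmetic.
import Mathlib
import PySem

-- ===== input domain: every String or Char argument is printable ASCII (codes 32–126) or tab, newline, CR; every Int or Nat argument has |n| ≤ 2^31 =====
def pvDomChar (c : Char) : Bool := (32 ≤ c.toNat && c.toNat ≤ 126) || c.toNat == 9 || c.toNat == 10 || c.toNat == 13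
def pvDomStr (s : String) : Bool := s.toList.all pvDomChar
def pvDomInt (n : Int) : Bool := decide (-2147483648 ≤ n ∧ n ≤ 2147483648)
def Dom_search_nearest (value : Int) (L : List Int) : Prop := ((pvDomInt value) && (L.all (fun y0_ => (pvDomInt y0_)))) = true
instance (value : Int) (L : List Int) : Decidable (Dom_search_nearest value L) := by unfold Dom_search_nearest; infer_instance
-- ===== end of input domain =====

-- B replaces A's slice-copying recursion by an iterative two-pointer binary search over
-- index bounds (lo, hi), performing the same comparisons without building sublists
-- (objective: alternative).

-- ===== PORT A =====
-- A's half_right, for both parities of len(L)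
def pvHalfRight (n : Nat) : Nat := if n % 2 = 0 then n / 2 else (n + 1) / 2

-- literal port of A, with a fuel counter as a pure totality guard (each recursive call
-- strictly shrinks the list, so fuel = len(L) never runs out); Python raises IndexError
-- on L = [] (excluded by Pre_), here 0. L[half_right:] / L[:half_left+1] are ported as
-- drop/take (exact: the indices are non-negative and ≤ len(L)); L[-1] of the nonempty
-- a :: t is t.getLastD a; the in-range L[half_right] / L[half_left] are getD.
def snAFuel (value : Int) : Nat → List Int → Int
  | _, [] => 0
  | 0, _ :: _ => 0
  | fuel + 1, a :: t =>
    if value ≤ a then a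
    else if t.getLastD a ≤ value then t.getLastD a
    else if (a :: t).getD (pvHalfRight (a :: t).length) 0 < value then
      snAFuel value fuel ((a :: t).drop (pvHalfRight (a :: t).length))
    else if value < (a :: t).getD (pvHalfRight (a :: t).length - 1) 0 then
      snAFuel value fuel ((a :: t).take (pvHalfRight (a :: t).length - 1 + 1))
    else if |value - (a :: t).getD (pvHalfRight (a :: t).length - 1) 0| ≤
              |value - (a :: t).getD (pvHalfRight (a :: t).length) 0| then
      (a :: t).getD (pvHalfRight (a :: t).length - 1) 0
    else
      (a :: t).getD (pvHalfRight (a :: t).length) 0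

def search_nearest (value : Int) (L : List Int) : Int := snAFuel value L.length L

-- ===== PORT B =====
-- the while-loop of B on the index window [lo, hi], with a fuel counter as a pure
-- totality guard (the window shrinks every iteration, so fuel = len(L) never runs out);
-- the in-range L[lo] / L[hi] / L[mid_right] / L[mid_left] are getD.
def snBLoop (value : Int) (L : List Int) : Nat → Nat → Nat → Int
  | 0, _, _ => 0
  | fuel + 1, lo, hi =>
    if value ≤ L.getD lo 0 then L.getD lo 0
    else if L.getD hi 0 ≤ value then L.getD hi 0
    else if L.getD (lo + (hi - lo + 1 + 1) / 2) 0 < value then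
      snBLoop value L fuel (lo + (hi - lo + 1 + 1) / 2) hi
    else if value < L.getD (lo + (hi - lo + 1 + 1) / 2 - 1) 0 then
      snBLoop value L fuel lo (lo + (hi - lo + 1 + 1) / 2 - 1)
    else if value - L.getD (lo + (hi - lo + 1 + 1) / 2 - 1) 0 ≤
              L.getD (lo + (hi - lo + 1 + 1) / 2) 0 - value then
      L.getD (lo + (hi - lo + 1 + 1) / 2 - 1) 0
    else
      L.getD (lo + (hi - lo + 1 + 1) / 2) 0

-- literal port of B; Python raises IndexError on L = [] (excluded by Pre_), here 0.
def search_nearest_alt (value : Int) (L : List Int) : Int :=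
  match L with
  | [] => 0
  | _ :: _ => snBLoop value L L.length 0 (L.length - 1)

-- ===== PRECONDITION & SPEC =====
-- Pre_ excludes only the empty list, on which both Pythons raise IndexError.
def Pre_search_nearest (value : Int) (L : List Int) : Prop := L ≠ []

instance (value : Int) (L : List Int) : Decidable (Pre_search_nearest value L) := by
  unfold Pre_search_nearest; infer_instance

def pvWitness_search_nearest : Int × List Int := (3, [1, 2, 5])

def Spec_search_nearest (value : Int) (L : List Int) (out : Int) : Prop := out = search_nearest_alt value L
instance (value : Int) (L : List Int) (out : Int) : Decidable (Spec_search_nearest value L out) := by unfold Spec_search_nearest; infer_instance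

-- ===== CLAIM (what is proved, stated in full; the proofs are below) =====
def Claim_equal_search_nearest : Prop := ∀ (value : Int) (L : List Int), Dom_search_nearest value L → Pre_search_nearest value L → Spec_search_nearest value L (search_nearest value L)

-- ===== LEMMAS AND PROOFS =====

theorem pvHalfRight_eq (n : Nat) : pvHalfRight n = (n + 1) / 2 := by
  unfold pvHalfRight; split <;> omega

-- ---- getD toolkit ----
theorem getD_cons_pos (a : Int) (t : List Int) (k : Nat) (h : 0 < k) :
    (a :: t).getD k 0 = t.getD (k - 1) 0 := by
  cases k with
  | zero => omega
  | succ k' => simp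

theorem getD_take (l : List Int) (k i : Nat) (hik : i < k) (hil : i < l.length) :
    (l.take k).getD i 0 = l.getD i 0 := by
  have h1 : i < (l.take k).length := by simp; omega
  rw [List.getD_eq_getElem _ 0 h1, List.getD_eq_getElem l 0 hil]
  exact List.getElem_take

theorem getD_drop (l : List Int) (n i : Nat) (h : n + i < l.length) :
    (l.drop n).getD i 0 = l.getD (n + i) 0 := by
  have h1 : i < (l.drop n).length := by simp only [List.length_drop]; omega
  rw [List.getD_eq_getElem _ 0 h1, List.getD_eq_getElem l 0 h]
  exact List.getElem_drop

theorem getLastD_eq_getD (l : List Int) (d : Int) (h : l ≠ []) :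
    l.getLastD d = l.getD (l.length - 1) 0 := by
  induction l generalizing d with
  | nil => exact absurd rfl h
  | cons a t ih =>
    cases t with
    | nil => simp
    | cons b t' =>
      have h2 : (b :: t') ≠ [] := by simp
      have hidx : (a :: b :: t').length - 1 = ((b :: t').length - 1) + 1 := by simp
      rw [List.getLastD_cons, ih a h2, hidx,
        getD_cons_pos a (b :: t') (((b :: t').length - 1) + 1) (by omega)]
      simp

-- window getD: the k-th element of the window [lo, hi] of L is L[lo+k]
theorem window_getD (L : List Int) (lo hi k : Nat) (hk : k < hi - lo + 1)
    (hhi : hi < L.length) (hlo : lo ≤ hi) :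
    ((L.drop lo).take (hi - lo + 1)).getD k 0 = L.getD (lo + k) 0 := by
  rw [getD_take _ _ _ hk (by simp only [List.length_drop]; omega), getD_drop _ _ _ (by omega)]

-- main equivalence: A's recursion on the window slice equals B's loop on the index pair
theorem snAFuel_eq_snBLoop (value : Int) (L : List Int) : ∀ (fA : Nat), ∀ (fB lo hi : Nat),
    lo ≤ hi → hi < L.length → hi - lo + 1 ≤ fA → hi - lo + 1 ≤ fB →
    snAFuel value fA ((L.drop lo).take (hi - lo + 1)) = snBLoop value L fB lo hi := by
  intro fA
  induction fA with
  | zero =>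
    intro fB lo hi _ _ hfA _
    omega
  | succ fA ih =>
    intro fB lo hi hlohi hhiL hfA hfB
    cases fB with
    | zero => omega
    | succ fB =>
      have hWlen : ((L.drop lo).take (hi - lo + 1)).length = hi - lo + 1 := by
        simp only [List.length_take, List.length_drop]
        omega
      cases hW : (L.drop lo).take (hi - lo + 1) with
      | nil => rw [hW] at hWlen; simp at hWlen
      | cons a t =>
        have hWlen2 : (a :: t).length = hi - lo + 1 := by rw [← hW]; exact hWlen
        have hga : a = L.getD lo 0 := by
          have h0 := window_getD L lo hi 0 (by omega) hhiL hlohi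
          rw [hW] at h0
          simpa using h0
        have hlast : t.getLastD a = L.getD hi 0 := by
          have h2 := window_getD L lo hi (hi - lo) (by omega) hhiL hlohi
          rw [hW] at h2
          have hidx : (a :: t).length - 1 = hi - lo := by omega
          calc t.getLastD a
              = (a :: t).getLastD 0 := List.getLastD_cons.symm
            _ = (a :: t).getD ((a :: t).length - 1) 0 :=
                getLastD_eq_getD _ 0 (List.cons_ne_nil a t)
            _ = (a :: t).getD (hi - lo) 0 := by rw [hidx]
            _ = L.getD (lo + (hi - lo)) 0 := h2
            _ = L.getD hi 0 := by congr 1; omega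
        simp only [snAFuel, snBLoop]
        rw [← hga, ← hlast]
        by_cases c1 : value ≤ a
        · rw [if_pos c1, if_pos c1]
        · rw [if_neg c1, if_neg c1]
          by_cases c2 : t.getLastD a ≤ value
          · rw [if_pos c2, if_pos c2]
          · rw [if_neg c2, if_neg c2]
            -- the window has ≥ 2 elements: lo = hi would force value ≤ L[lo] or L[hi] ≤ value
            have hs2 : lo < hi := by
              rcases Nat.lt_or_ge lo hi with h | h
              · exact h
              · exfalso
                have he : lo = hi := by omega
                have hta : t.getLastD a = a := by rw [hlast, hga, he]
                omega
            have hhr : pvHalfRight (a :: t).length = (hi - lo + 1 + 1) / 2 := by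
              rw [hWlen2, pvHalfRight_eq]
            have hhr1 : 1 ≤ (hi - lo + 1 + 1) / 2 := by omega
            have hhrlt : (hi - lo + 1 + 1) / 2 < hi - lo + 1 := by omega
            have hgr : (a :: t).getD (pvHalfRight (a :: t).length) 0 =
                L.getD (lo + (hi - lo + 1 + 1) / 2) 0 := by
              rw [hhr]
              have := window_getD L lo hi ((hi - lo + 1 + 1) / 2) (by omega) hhiL hlohi
              rw [hW] at this
              exact this
            have hgl : (a :: t).getD (pvHalfRight (a :: t).length - 1) 0 =
                L.getD (lo + (hi - lo + 1 + 1) / 2 - 1) 0 := by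
              rw [hhr]
              have h3 := window_getD L lo hi ((hi - lo + 1 + 1) / 2 - 1) (by omega) hhiL hlohi
              rw [hW] at h3
              rw [h3]
              congr 1
              omega
            have hdrop : (a :: t).drop (pvHalfRight (a :: t).length) =
                (L.drop (lo + (hi - lo + 1 + 1) / 2)).take
                  (hi - (lo + (hi - lo + 1 + 1) / 2) + 1) := by
              rw [hhr, ← hW, List.drop_take, List.drop_drop]
              congr 1
              omega
            have htake : (a :: t).take (pvHalfRight (a :: t).length - 1 + 1) =
                (L.drop lo).take ((lo + (hi - lo + 1 + 1) / 2 - 1) - lo + 1) := by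
              rw [hhr, ← hW, List.take_take]
              congr 1
              omega
            rw [← hgr, ← hgl]
            by_cases c3 : (a :: t).getD (pvHalfRight (a :: t).length) 0 < value
            · rw [if_pos c3, if_pos c3]
              rw [hdrop]
              exact ih fB (lo + (hi - lo + 1 + 1) / 2) hi (by omega) hhiL (by omega) (by omega)
            · rw [if_neg c3, if_neg c3]
              push_neg at c3
              by_cases c4 : value < (a :: t).getD (pvHalfRight (a :: t).length - 1) 0
              · rw [if_pos c4, if_pos c4]
                rw [htake]
                exact ih fB lo (lo + (hi - lo + 1 + 1) / 2 - 1) (by omega) (by omega)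
                  (by omega) (by omega)
              · rw [if_neg c4, if_neg c4]
                push_neg at c4
                rw [abs_of_nonneg (by omega :
                      (0:Int) ≤ value - (a :: t).getD (pvHalfRight (a :: t).length - 1) 0),
                  abs_of_nonpos (by omega :
                      value - (a :: t).getD (pvHalfRight (a :: t).length) 0 ≤ 0), neg_sub]

-- ===== VERDICT (by name: the statement is the Claim_ definition above) =====
theorem search_nearest_spec : Claim_equal_search_nearest := by
  intro value L _ hpre
  unfold Spec_search_nearest
  cases L with
  | nil => exact absurd rfl hpre
  | cons a t =>
    show snAFuel value (a :: t).length (a :: t) = snBLoop value (a :: t) (a :: t).length 0 ((a :: t).length - 1)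
    have hwin : ((a :: t).drop 0).take ((a :: t).length - 1 - 0 + 1) = a :: t := by
      rw [List.drop_zero]
      have : (a :: t).length - 1 - 0 + 1 = (a :: t).length := by
        simp only [List.length_cons]
        omega
      rw [this, List.take_length]
    calc snAFuel value (a :: t).length (a :: t)
        = snAFuel value (a :: t).length (((a :: t).drop 0).take ((a :: t).length - 1 - 0 + 1)) := by
          rw [hwin]
      _ = snBLoop value (a :: t) (a :: t).length 0 ((a :: t).length - 1) := by
          exact snAFuel_eq_snBLoop value (a :: t) (a :: t).length (a :: t).length 0
            ((a :: t).length - 1) (by simp only [List.length_cons]; omega)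
            (by simp only [List.length_cons]; omega)
            (by simp only [List.length_cons]; omega)
            (by simp only [List.length_cons]; omega)
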